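-- pv_equiv track=rewrite | github.com/Salome2010/IntroProgramacion | repaso.py | ap_antes_corte
-- ===== SOURCE A (Python) =====
-- def ap_antes_corte(c:str, s:str) -> int:
--     total:int = 0
--     for i in range(len(s)):
--         if c == s[i]:
--             if s[i] == "r" :
--                 total+=1
--             elif s[i] == "v":
--                 total+=1
--         elif  s[i] == "x":
--                 return total
--     return total
-- ===== SOURCE B (Python) =====
-- def ap_antes_corte(c: str, s: str) -> int:
--     # Only c == "r" or c == "v" can ever be counted; everything else totals 0.
--     if c not in ("r", "v"):
--         return 0
--     idx = s.find("x")
--     prefix = s if idx == -1 else s[:idx]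
--     return prefix.count(c)
-- ===== Notes on version B (the rewrite author's own statement) =====
-- stated objective: faster
-- what changed: Replaces the interleaved per-character index loop with conditional early return by an r/v guard, one find of the first 'x' to cut the prefix, and one count pass over that prefix (C-level str.find/str.count instead of an interpreted loop).
import Mathlib
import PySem

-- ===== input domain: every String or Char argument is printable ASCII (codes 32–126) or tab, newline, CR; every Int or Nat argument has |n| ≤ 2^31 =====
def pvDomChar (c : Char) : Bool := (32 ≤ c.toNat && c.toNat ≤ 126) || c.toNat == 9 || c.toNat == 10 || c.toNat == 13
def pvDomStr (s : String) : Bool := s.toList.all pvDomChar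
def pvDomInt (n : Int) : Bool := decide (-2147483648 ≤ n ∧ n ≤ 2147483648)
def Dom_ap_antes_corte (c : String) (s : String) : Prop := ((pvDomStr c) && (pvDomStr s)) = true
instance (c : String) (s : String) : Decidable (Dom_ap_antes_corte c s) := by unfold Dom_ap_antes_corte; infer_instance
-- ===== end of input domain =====

-- B replaces A's interleaved scan (conditional early return at 'x') by guard + find + one count over the prefix; same values everywhere (measured faster by a constant factor: C-level find/count).

-- ===== PORT A =====
-- A's 'for i in range(len(s))' visits s[0], s[1], … in order; the loop body (with its
-- early 'return total' at an 'x') becomes structural recursion over the character list.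
-- Python's 'c == s[i]' compares c with the length-1 string s[i]: as lists of code points
-- that is 'c.toList = [ch]', and 's[i] == "r"' is 'ch = 'r''.
def apLoop (c : List Char) : List Char → Int → Int
  | [], total => total
  | ch :: rest, total =>
    if c = [ch] then
      if ch = 'r' then apLoop c rest (total + 1)
      else if ch = 'v' then apLoop c rest (total + 1)
      else apLoop c rest total
    else if ch = 'x' then total
    else apLoop c rest total

def ap_antes_corte (c : String) (s : String) : Int := apLoop c.toList s.toList 0

-- ===== PORT B =====
def ap_antes_corte_alt (c : String) (s : String) : Int :=
  if ¬ (c = "r" ∨ c = "v") then 0          -- if c not in ("r", "v"): return 0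
  else
    let idx := PySem.Str.find s "x"        -- idx = s.find("x")
    let pre := if idx = -1 then s else PySem.Str.slice s none (some idx)
    (PySem.Str.count pre c : Int)          -- prefix.count(c)

-- ===== PRECONDITION & SPEC =====
def Spec_ap_antes_corte (c : String) (s : String) (out : Int) : Prop := out = ap_antes_corte_alt c s
instance (c : String) (s : String) (out : Int) : Decidable (Spec_ap_antes_corte c s out) := by unfold Spec_ap_antes_corte; infer_instance

-- ===== CLAIM (what is proved, stated in full; the proofs are below) =====
def Claim_equal_ap_antes_corte : Prop := ∀ (c : String) (s : String), Dom_ap_antes_corte c s → Spec_ap_antes_corte c s (ap_antes_corte c s)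

-- ===== LEMMAS AND PROOFS =====

-- If c is neither "r" nor "v", A's loop never increments and every exit returns total unchanged.
lemma apLoop_const (c : List Char) (hr : c ≠ ['r']) (hv : c ≠ ['v']) :
    ∀ (l : List Char) (t : Int), apLoop c l t = t := by
  intro l
  induction l with
  | nil => intro t; rfl
  | cons ch rest ih =>
    intro t
    by_cases hc : c = [ch]
    · subst hc
      have hchr : ch ≠ 'r' := by intro h; exact hr (by simp [h])
      have hchv : ch ≠ 'v' := by intro h; exact hv (by simp [h])
      simp [apLoop, hchr, hchv, ih]
    · by_cases hx : ch = 'x'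
      · subst hx; simp [apLoop, hc]
      · simp [apLoop, hc, hx, ih]

-- For c = "r" or "v", A's loop adds the count of that letter in the prefix before the first 'x'.
lemma apLoop_count (a : Char) (ha : a = 'r' ∨ a = 'v') :
    ∀ (l : List Char) (t : Int), apLoop [a] l t = t + ((l.takeWhile (· ≠ 'x')).count a : Int) := by
  have hax : a ≠ 'x' := by rcases ha with h | h <;> simp [h]
  intro l
  induction l with
  | nil => intro t; simp [apLoop]
  | cons ch rest ih =>
    intro t
    by_cases hc : ch = a
    · subst hc
      have hstep : apLoop [ch] (ch :: rest) t = apLoop [ch] rest (t + 1) := by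
        rcases ha with h | h <;> simp [apLoop, h]
      rw [hstep, ih]
      simp [hax]
      ring
    · have hne : ([a] : List Char) ≠ [ch] := by
        intro h; injection h with h'; exact hc h'.symm
      have hc' : ¬ (a = ch) := fun h => hc h.symm
      by_cases hx : ch = 'x'
      · subst hx; simp [apLoop, hne]
      · simp [apLoop, hne, hx, ih]
        simp [hc]

-- s.count(c) for a single-character c is the plain character count (fuelled go of PySem.Chars.count).
lemma countGo_singleton (a : Char) :
    ∀ (l : List Char) (fuel acc : Nat), l.length ≤ fuel →
      PySem.Chars.count.go [a] fuel l acc = acc + l.count a := by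
  intro l
  induction l with
  | nil =>
    intro fuel acc _
    cases fuel <;> simp [PySem.Chars.count.go]
  | cons ch rest ih =>
    intro fuel acc hf
    cases fuel with
    | zero => simp at hf
    | succ n =>
      have hn : rest.length ≤ n := by simpa using hf
      by_cases hc : a = ch
      · subst hc
        simp [PySem.Chars.count.go, List.isPrefixOf, ih n (acc + 1) hn]
        omega
      · have hc' : ¬ (ch = a) := fun h => hc h.symm
        simp [PySem.Chars.count.go, List.isPrefixOf, hc, hc', ih n acc hn]

lemma count_singleton (a : Char) (l : List Char) :
    PySem.Chars.count l [a] = l.count a := by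
  have h := countGo_singleton a l l.length 0 le_rfl
  simpa [PySem.Chars.count] using h

-- s.find("x") : -1 when no 'x', else the length of the prefix before the first 'x'.
lemma findGo_x :
    ∀ (l : List Char) (k : Nat),
      PySem.Chars.find.go ['x'] l k =
        if 'x' ∈ l then ((k : Int) + (l.takeWhile (· ≠ 'x')).length) else -1 := by
  intro l
  induction l with
  | nil => intro k; simp [PySem.Chars.find.go]
  | cons ch rest ih =>
    intro k
    by_cases hx : ch = 'x'
    · subst hx
      simp [PySem.Chars.find.go, List.isPrefixOf]
    · have hx' : ¬ ('x' = ch) := fun h => hx h.symm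
      rw [show PySem.Chars.find.go ['x'] (ch :: rest) k = PySem.Chars.find.go ['x'] rest (k + 1) by
        simp [PySem.Chars.find.go, List.isPrefixOf, hx']]
      rw [ih]
      by_cases hm : 'x' ∈ rest
      · simp [hm, hx]
        ring
      · simp [hm, hx']

lemma find_x (l : List Char) :
    PySem.Chars.find l ['x'] =
      if 'x' ∈ l then ((l.takeWhile (· ≠ 'x')).length : Int) else -1 := by
  have h := findGo_x l 0
  simpa [PySem.Chars.find] using h

lemma take_length_takeWhile (p : Char → Bool) (l : List Char) :
    l.take (l.takeWhile p).length = l.takeWhile p := by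
  induction l with
  | nil => simp
  | cons a t ih =>
    by_cases h : p a
    · simp [h, ih]
    · simp [h]

-- B's computed prefix, as a character list, is exactly the part of s before the first 'x'.
lemma pre_toList (s : String) :
    (if PySem.Str.find s "x" = -1 then s
     else PySem.Str.slice s none (some (PySem.Str.find s "x"))).toList
      = s.toList.takeWhile (· ≠ 'x') := by
  have hfind : PySem.Str.find s "x" = PySem.Chars.find s.toList ['x'] := by
    simp [PySem.Str.find_eq]
  by_cases hm : 'x' ∈ s.toList
  · have hval : PySem.Str.find s "x" = ((s.toList.takeWhile (· ≠ 'x')).length : Int) := by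
      rw [hfind, find_x]; simp [hm]
    have hne : PySem.Str.find s "x" ≠ -1 := by rw [hval]; omega
    rw [if_neg hne, hval]
    have hsl : (PySem.Str.slice s none (some ((s.toList.takeWhile (· ≠ 'x')).length : Int))).toList
        = PySem.List.slice s.toList none (some ((s.toList.takeWhile (· ≠ 'x')).length : Int)) := by
      simp [PySem.Str.toList_slice]
    rw [hsl, PySem.List.slice_to_natCast]
    exact take_length_takeWhile _ _
  · have heq : PySem.Str.find s "x" = -1 := by rw [hfind, find_x]; simp [hm]
    rw [if_pos heq]
    exact (List.takeWhile_eq_self_iff.mpr (by intro x hx; simp; rintro rfl; exact hm hx)).symm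

lemma toList_ne_of_ne_r {c : String} (h : c ≠ "r") : c.toList ≠ ['r'] := by
  intro hl
  exact h (String.toList_inj.mp (by simpa using hl))

lemma toList_ne_of_ne_v {c : String} (h : c ≠ "v") : c.toList ≠ ['v'] := by
  intro hl
  exact h (String.toList_inj.mp (by simpa using hl))

-- A = (prefix-before-'x').count c, for c = "r" and c = "v" (the two cases of B's guard).
lemma main_case_r (s : String) :
    apLoop ("r" : String).toList s.toList 0 =
      ((PySem.Str.count (if PySem.Str.find s "x" = -1 then s
        else PySem.Str.slice s none (some (PySem.Str.find s "x"))) "r" : Nat) : Int) := by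
  rw [show ("r" : String).toList = ['r'] from rfl, apLoop_count 'r' (Or.inl rfl)]
  rw [PySem.Str.count_eq, pre_toList, show ("r" : String).toList = ['r'] from rfl,
      count_singleton]
  simp

lemma main_case_v (s : String) :
    apLoop ("v" : String).toList s.toList 0 =
      ((PySem.Str.count (if PySem.Str.find s "x" = -1 then s
        else PySem.Str.slice s none (some (PySem.Str.find s "x"))) "v" : Nat) : Int) := by
  rw [show ("v" : String).toList = ['v'] from rfl, apLoop_count 'v' (Or.inr rfl)]
  rw [PySem.Str.count_eq, pre_toList, show ("v" : String).toList = ['v'] from rfl,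
      count_singleton]
  simp

-- ===== VERDICT (by name: the statement is the Claim_ definition above) =====
theorem ap_antes_corte_spec : Claim_equal_ap_antes_corte := by
  intro c s _
  unfold Spec_ap_antes_corte ap_antes_corte ap_antes_corte_alt
  by_cases hr : c = "r"
  · subst hr
    rw [if_neg (show ¬¬(("r" : String) = "r" ∨ ("r" : String) = "v") by simp)]
    exact main_case_r s
  · by_cases hv : c = "v"
    · subst hv
      rw [if_neg (show ¬¬(("v" : String) = "r" ∨ ("v" : String) = "v") by simp)]
      exact main_case_v s
    · rw [if_pos (by simp [hr, hv])]
      exact apLoop_const c.toList (toList_ne_of_ne_r hr) (toList_ne_of_ne_v hv) s.toList 0
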